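-- pv_equiv track=rewrite | github.com/cemathey/aoc_2015 | day11/day11.py | has_valid_char_run
-- ===== SOURCE A (Python) =====
-- def has_valid_char_run(password, run_length=3) -> bool:
--     """Return whether the password contains a run of characters of the required length."""
--     if len(password) < run_length:
--         return False
--
--     for idx in range(0, len(password) - run_length):
--
--         chars = list(password[idx : idx + run_length])
--         # Get the unicode code points for each character in our slice
--         code_points = tuple(map(ord, chars))
--
--         first = code_points[0]
--
--         # For this to be a run each code point should be the value of the first
--         # character plus its position in the list
--         deltas = tuple(first + offset for offset in range(run_length))
--
--         if code_points == deltas: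
--             return True
--
--     return False
-- ===== SOURCE B (Python) =====
-- def has_valid_char_run(password, run_length=3) -> bool:
--     """Return whether the password contains a run of characters of the required length."""
--     if run_length <= 1:
--         return len(password) >= run_length
--     run = 1
--     for prev, cur in zip(password, password[1:]):
--         run = run + 1 if ord(cur) == ord(prev) + 1 else 1
--         if run >= run_length:
--             return True
--     return False
-- ===== Notes on version B (the rewrite author's own statement) =====
-- stated objective: faster
-- what changed: Replaces the re-slice-and-rebuild window scan (each index builds a slice, an ord tuple and a delta tuple) by a single pass over adjacent character pairs that maintains an integer run counter, and checks every window including the final one.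
-- intended difference: On inputs whose only increasing run of the required length ends exactly at the last character (the window A's loop bound len(password)-run_length skips), A returns False while B returns True, which is the intended answer since such a run is present. — e.g. on has_valid_char_run("abc", 3): A returns false, B returns true
import Mathlib
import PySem

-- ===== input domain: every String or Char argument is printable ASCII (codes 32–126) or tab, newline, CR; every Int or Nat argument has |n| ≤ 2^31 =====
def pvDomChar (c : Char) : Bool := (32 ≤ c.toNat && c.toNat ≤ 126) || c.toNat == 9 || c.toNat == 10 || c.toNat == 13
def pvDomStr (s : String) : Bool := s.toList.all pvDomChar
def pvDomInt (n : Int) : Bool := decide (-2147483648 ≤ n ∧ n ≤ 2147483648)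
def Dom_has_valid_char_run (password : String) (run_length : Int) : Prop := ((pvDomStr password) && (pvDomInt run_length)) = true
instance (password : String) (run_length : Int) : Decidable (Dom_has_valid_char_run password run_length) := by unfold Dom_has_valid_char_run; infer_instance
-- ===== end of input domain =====

-- B replaces A's per-index slice/tuple-rebuild window scan by a single adjacent-pair pass with a
-- run counter (faster), and checks every window including the final one A's loop bound skips (D_ below).

-- ===== PORT A =====
def pyOrd (c : Char) : Int := (c.toNat : Int)

def has_valid_char_run (password : String) (run_length : Int) : Bool :=
  let s := password.toList
  if (s.length : Int) < run_length then false
  else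
    -- 'for idx in range(0, len(password) - run_length): … if …: return True' / 'return False'
    (PySem.List.pyRange 0 ((s.length : Int) - run_length) 1).any (fun idx =>
      let chars := PySem.List.slice s (some idx) (some (idx + run_length))
      let code_points := chars.map pyOrd
      -- code_points[0]; Python raises IndexError when empty — those inputs are outside Pre_ (getD 0 is a placeholder there)
      let first := (PySem.List.pyGet? code_points 0).getD 0
      let deltas := (PySem.List.pyRange 0 run_length 1).map (fun offset => first + offset)
      code_points == deltas)

-- ===== PORT B =====
-- 'for prev, cur in zip(password, password[1:]): run = …; if run >= run_length: return True' / 'return False'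
def hvcrLoop (run_length : Int) (prev : Char) (rest : List Char) (run : Int) : Bool :=
  match rest with
  | [] => false
  | cur :: cs =>
    let run' := if pyOrd cur == pyOrd prev + 1 then run + 1 else 1
    if run_length ≤ run' then true else hvcrLoop run_length cur cs run'

def has_valid_char_run_alt (password : String) (run_length : Int) : Bool :=
  if run_length ≤ 1 then decide (run_length ≤ (password.toList.length : Int))
  else
    match password.toList with
    | [] => false
    | c :: cs => hvcrLoop run_length c cs 1

-- ===== PRECONDITION & SPEC =====
-- Pre_ excludes exactly the inputs where A raises IndexError (code_points[0] of an empty slice): run_length ≤ 0,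
-- apart from the empty password with run_length zero, on which A returns and which stays inside Pre_.
def Pre_has_valid_char_run (password : String) (run_length : Int) : Prop :=
  1 ≤ run_length ∨ (run_length = 0 ∧ password = "")
instance (password : String) (run_length : Int) : Decidable (Pre_has_valid_char_run password run_length) := by
  unfold Pre_has_valid_char_run; infer_instance

def pvWitness_has_valid_char_run : String × Int := ("abcd", 3)

-- On inputs whose only increasing run of the required length ends exactly at the last character (the window
-- A's loop bound len - run_length skips), A returns False while B returns True, the intended answer.
def D_has_valid_char_run (password : String) (run_length : Int) : Prop :=
  let s := password.toList
  run_length ≤ (s.length : Int) ∧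
  ∀ idx ≤ s.length - run_length.toNat,
    (List.IsChain (fun a b => b.toNat = a.toNat + 1) ((s.drop idx).take run_length.toNat) ↔
      idx = s.length - run_length.toNat)
instance (password : String) (run_length : Int) : Decidable (D_has_valid_char_run password run_length) := by
  unfold D_has_valid_char_run; infer_instance

def Spec_has_valid_char_run (password : String) (run_length : Int) (out : Bool) : Prop :=
  ¬ D_has_valid_char_run password run_length → out = has_valid_char_run_alt password run_length
instance (password : String) (run_length : Int) (out : Bool) : Decidable (Spec_has_valid_char_run password run_length out) := by
  unfold Spec_has_valid_char_run; infer_instance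

def pvDiffWitness_has_valid_char_run : String × Int := ("abc", 3)
def pvDiffWitnessOut_has_valid_char_run : Bool × Bool := (false, true)

-- ===== CLAIM (what is proved, stated in full; the proofs are below) =====
def Claim_unchanged_has_valid_char_run : Prop := ∀ (password : String) (run_length : Int), Dom_has_valid_char_run password run_length → Pre_has_valid_char_run password run_length → Spec_has_valid_char_run password run_length (has_valid_char_run password run_length)
def Claim_changed_has_valid_char_run : Prop := Dom_has_valid_char_run (pvDiffWitness_has_valid_char_run.1) (pvDiffWitness_has_valid_char_run.2) ∧ Pre_has_valid_char_run (pvDiffWitness_has_valid_char_run.1) (pvDiffWitness_has_valid_char_run.2) ∧ D_has_valid_char_run (pvDiffWitness_has_valid_char_run.1) (pvDiffWitness_has_valid_char_run.2) ∧ has_valid_char_run (pvDiffWitness_has_valid_char_run.1) (pvDiffWitness_has_valid_char_run.2) = pvDiffWitnessOut_has_valid_char_run.1 ∧ has_valid_char_run_alt (pvDiffWitness_has_valid_char_run.1) (pvDiffWitness_has_valid_char_run.2) = pvDiffWitnessOut_has_valid_char_run.2 ∧ pvDiffWitnessOut_has_valid_char_run.1 ≠ pvDiffWitnessOut_has_v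alid_char_run.2
def Claim_exact_has_valid_char_run : Prop := ∀ (password : String) (run_length : Int), Dom_has_valid_char_run password run_length → Pre_has_valid_char_run password run_length → D_has_valid_char_run password run_length → has_valid_char_run password run_length ≠ has_valid_char_run_alt password run_length

-- ===== LEMMAS AND PROOFS =====

-- chainB w = true iff consecutive characters of w increase by exactly one code point
def chainB : List Char → Bool
  | [] => true
  | [_] => true
  | a :: b :: t => (b.toNat == a.toNat + 1) && chainB (b :: t)

lemma chainB_iff : ∀ l : List Char,
    chainB l = true ↔ List.IsChain (fun a b => b.toNat = a.toNat + 1) l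
  | [] => by simp [chainB]
  | [a] => by simp [chainB]
  | a :: b :: t => by
    simp [chainB, List.isChain_cons_cons, chainB_iff (b :: t)]

-- length of the maximal prefix of l that continues the +1 chain from prev
def headChain (prev : Char) : List Char → Nat
  | [] => 0
  | c :: cs => if c.toNat = prev.toNat + 1 then headChain c cs + 1 else 0

-- "some window of length m inside l is a chain"
abbrev W (m : Nat) (l : List Char) : Prop :=
  ∃ idx, idx + m ≤ l.length ∧ chainB ((l.drop idx).take m) = true

-- "some window of length m, not the last one, is a chain" (A's search space)
abbrev WA (m : Nat) (l : List Char) : Prop :=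
  ∃ idx, idx + m < l.length ∧ chainB ((l.drop idx).take m) = true

lemma headChain_le (prev : Char) (l : List Char) : headChain prev l ≤ l.length := by
  induction l generalizing prev with
  | nil => simp [headChain]
  | cons c cs ih => simp only [headChain]; split <;> simp [Nat.succ_le_succ (ih c)]

lemma chainB_cons_iff (a : Char) (t : List Char) :
    chainB (a :: t) = true ↔ headChain a t = t.length := by
  induction t generalizing a with
  | nil => simp [chainB, headChain]
  | cons b t' ih =>
    simp only [chainB, headChain, Bool.and_eq_true, beq_iff_eq, List.length_cons]
    constructor
    · rintro ⟨h1, h2⟩; rw [if_pos h1, (ih b).mp h2]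
    · intro h
      by_cases h1 : b.toNat = a.toNat + 1
      · rw [if_pos h1] at h
        exact ⟨h1, (ih b).mpr (Nat.succ_injective h)⟩
      · rw [if_neg h1] at h
        have := headChain_le b t'; omega

lemma headChain_take (a : Char) (t : List Char) (k : Nat) :
    headChain a (t.take k) = min (headChain a t) k := by
  induction t generalizing a k with
  | nil => simp [headChain]
  | cons c cs ih =>
    cases k with
    | zero => simp [headChain]
    | succ k' =>
      simp only [List.take_succ_cons, headChain]
      split
      · rw [ih c k']; omega
      · simp

lemma window0_iff (m : Nat) (hm : 1 ≤ m) (cur : Char) (cs : List Char) :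
    (m ≤ cs.length + 1 ∧ chainB ((cur :: cs).take m) = true) ↔ m - 1 ≤ headChain cur cs := by
  obtain ⟨k, rfl⟩ : ∃ k, m = k + 1 := ⟨m - 1, by omega⟩
  rw [List.take_succ_cons, chainB_cons_iff, headChain_take, List.length_take]
  have := headChain_le cur cs
  omega

lemma W_cons_iff (m : Nat) (cur : Char) (cs : List Char) :
    W m (cur :: cs) ↔ (m ≤ cs.length + 1 ∧ chainB ((cur :: cs).take m) = true) ∨ W m cs := by
  constructor
  · rintro ⟨idx, hle, hch⟩
    cases idx with
    | zero => left; exact ⟨by simpa using hle, by simpa using hch⟩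
    | succ i => right; exact ⟨i, by simp at hle ⊢; omega, by simpa using hch⟩
  · rintro (⟨hle, hch⟩ | ⟨i, hle, hch⟩)
    · exact ⟨0, by simp; omega, by simpa using hch⟩
    · exact ⟨i + 1, by simp; omega, by simpa using hch⟩

lemma loop_iff (rl : Int) (h2 : 2 ≤ rl) (rest : List Char) :
    ∀ (prev : Char) (run : Int), 1 ≤ run → run < rl →
      (hvcrLoop rl prev rest run = true ↔
        (rl - run ≤ (headChain prev rest : Int) ∨ W rl.toNat rest)) := by
  induction rest with
  | nil =>
    intro prev run h1 hlt
    simp only [hvcrLoop]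
    constructor
    · intro h; simp at h
    · rintro (h | ⟨idx, hle, _⟩)
      · exfalso; simp [headChain] at h; omega
      · exfalso; simp at hle; omega
  | cons cur cs ih =>
    intro prev run h1 hlt
    have hm1 : 1 ≤ rl.toNat := by omega
    by_cases hc : cur.toNat = prev.toNat + 1
    · have hbeq : (pyOrd cur == pyOrd prev + 1) = true := by
        simp [pyOrd]; omega
      simp only [hvcrLoop, hbeq, if_true]
      have hhc : headChain prev (cur :: cs) = headChain cur cs + 1 := by
        simp [headChain, hc]
      by_cases hr : rl ≤ run + 1
      · rw [if_pos hr]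
        simp only [true_iff]
        left; rw [hhc]; push_cast; omega
      · rw [if_neg hr, ih cur (run + 1) (by omega) (by omega), W_cons_iff, window0_iff _ hm1,
          hhc]
        constructor
        · rintro (h | h)
          · left; push_cast; omega
          · right; right; exact h
        · rintro (h | (h | h))
          · left; omega
          · left
            have : (rl.toNat : Int) = rl := by omega
            omega
          · right; exact h
    · have hbeq : (pyOrd cur == pyOrd prev + 1) = false := by
        simp [pyOrd]; omega
      simp only [hvcrLoop, hbeq, if_false, Bool.false_eq_true]
      rw [if_neg (by omega : ¬ rl ≤ (1:Int)), ih cur 1 (by omega) (by omega), W_cons_iff,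
        window0_iff _ hm1]
      have hhc : headChain prev (cur :: cs) = 0 := by simp [headChain, hc]
      have hcast : (rl.toNat : Int) = rl := by omega
      constructor
      · rintro (h | h)
        · right; left; omega
        · right; right; exact h
      · rintro (h | (h | h))
        · rw [hhc] at h; omega
        · left; omega
        · right; exact h

-- B computes "some window of length run_length.toNat is a chain"
lemma B_char (password : String) (rl : Int) :
    has_valid_char_run_alt password rl = true ↔ W rl.toNat password.toList := by
  unfold has_valid_char_run_alt
  by_cases h1 : rl ≤ 1
  · rw [if_pos h1]
    simp only [decide_eq_true_eq]
    by_cases h0 : rl ≤ 0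
    · have : rl.toNat = 0 := by omega
      rw [this]
      constructor
      · intro _; exact ⟨0, by simp, by simp [chainB]⟩
      · intro _; omega
    · have h1' : rl = 1 := by omega
      subst h1'
      constructor
      · intro h
        obtain ⟨c, cs, hs⟩ : ∃ c cs, password.toList = c :: cs := by
          cases hh : password.toList with
          | nil => rw [hh] at h; simp at h
          | cons c cs => exact ⟨c, cs, rfl⟩
        exact ⟨0, by simp [hs], by simp [hs, chainB]⟩
      · rintro ⟨idx, hle, _⟩; simp at hle ⊢; omega
  · rw [if_neg h1]
    have h2 : 2 ≤ rl := by omega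
    cases hs : password.toList with
    | nil =>
      simp only [Bool.false_eq_true, false_iff]
      rintro ⟨idx, hle, _⟩
      simp at hle; omega
    | cons c cs =>
      rw [loop_iff rl h2 cs c 1 (by omega) (by omega), W_cons_iff, window0_iff _ (by omega)]
      have hcast : (rl.toNat : Int) = rl := by omega
      constructor
      · rintro (h | h)
        · left; omega
        · right; exact h
      · rintro (h | h)
        · left; omega
        · right; exact h

lemma map_eq_iff_chain (t : List Char) : ∀ (a : Char),
    ((a :: t).map pyOrd = (List.range (t.length + 1)).map (fun j : Nat => pyOrd a + (j : Int))) ↔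
      chainB (a :: t) = true := by
  induction t with
  | nil => intro a; simp [chainB]
  | cons b t' ih =>
    intro a
    rw [List.range_succ_eq_map]
    simp only [List.map_cons, List.map_map, List.length_cons]
    constructor
    · intro h
      have hhead : pyOrd a = pyOrd a + (0 : Int) := by ring
      rw [List.cons_eq_cons] at h
      obtain ⟨-, htail⟩ := h
      have hb : pyOrd b = pyOrd a + 1 := by
        have : ((b :: t').map pyOrd).head? = _ := congrArg List.head? htail
        simpa [List.range_succ_eq_map, Function.comp] using this
      have htail' : (b :: t').map pyOrd =
          (List.range (t'.length + 1)).map (fun j : Nat => pyOrd b + (j : Int)) := by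
        simp only [List.map_cons]
        rw [htail]
        apply List.map_congr_left
        intro x _
        simp [Function.comp, hb]; ring
      have hch := (ih b).mp htail'
      simp only [chainB, Bool.and_eq_true, beq_iff_eq]
      refine ⟨?_, hch⟩
      simp only [pyOrd] at hb; omega
    · intro h
      simp only [chainB, Bool.and_eq_true, beq_iff_eq] at h
      obtain ⟨hb, hch⟩ := h
      have hb' : pyOrd b = pyOrd a + 1 := by simp [pyOrd]; omega
      have htail' := (ih b).mpr hch
      rw [List.cons_eq_cons]
      refine ⟨by simp, ?_⟩
      have : (b :: t').map pyOrd = pyOrd b :: t'.map pyOrd := by simp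
      rw [← this, htail']
      apply List.map_congr_left
      intro x _
      simp [Function.comp, hb']; ring

-- A's per-index window test equals the chain test (the window is a :: t, of the right length)
lemma body_iff (rl : Int) (a : Char) (t : List Char) (htl : (t.length : Int) + 1 = rl) :
    (((a :: t).map pyOrd ==
        (PySem.List.pyRange 0 rl 1).map
          (fun offset => (PySem.List.pyGet? ((a :: t).map pyOrd) 0).getD 0 + offset)) = true) ↔
      chainB (a :: t) = true := by
  simp only [List.map_cons, PySem.List.pyGet?_zero_cons, Option.getD_some]
  rw [beq_iff_eq]
  have hr : PySem.List.pyRange 0 rl 1 = (List.range (t.length + 1)).map (fun k : Nat => (k : Int)) := by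
    rw [PySem.List.pyRange_one]
    have : (rl - 0).toNat = t.length + 1 := by omega
    rw [this]
    apply List.map_congr_left
    intro x _; simp
  rw [hr, List.map_map, ← map_eq_iff_chain]
  exact Iff.rfl

-- A computes "some non-final window of length run_length.toNat is a chain" (inside Pre_)
lemma A_char (password : String) (rl : Int) (hPre : Pre_has_valid_char_run password rl) :
    has_valid_char_run password rl = true ↔ WA rl.toNat password.toList := by
  have h0 : 0 ≤ rl := by rcases hPre with h | ⟨h, -⟩ <;> omega
  obtain ⟨m, rfl⟩ : ∃ m : Nat, rl = (m : Int) := ⟨rl.toNat, by omega⟩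
  unfold has_valid_char_run
  simp only [Int.toNat_natCast]
  set s := password.toList with hs
  by_cases hlen : (s.length : Int) < (m : Int)
  · rw [if_pos hlen]
    simp only [Bool.false_eq_true, false_iff]
    rintro ⟨idx, hlt, _⟩
    omega
  · rw [if_neg hlen]
    rw [PySem.List.pyRange_one, List.any_map, List.any_eq_true]
    have hmn : m ≤ s.length := by omega
    constructor
    · rintro ⟨k, hk, hbody⟩
      rw [List.mem_range] at hk
      have hk' : k < s.length - m := by omega
      refine ⟨k, by omega, ?_⟩
      simp only [Function.comp] at hbody
      have hsl : PySem.List.slice s (some ((0:Int) + k)) (some ((0:Int) + k + m)) =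
          (s.drop k).take m := by
        rw [show (0:Int) + k = ((k:Nat):Int) by ring]
        exact PySem.List.slice_natCast_add s k m
      rw [hsl] at hbody
      rcases Nat.eq_zero_or_pos m with hm0 | hmpos
      · -- m = 0: Pre_ forces s = [], contradicting k < s.length - 0
        subst hm0
        rcases hPre with h | ⟨-, hempty⟩
        · exact absurd h (by omega)
        · rw [hempty] at hs
          simp [hs] at hk'
      · obtain ⟨m', rfl⟩ : ∃ m', m = m' + 1 := ⟨m - 1, by omega⟩
        have hwl : ((s.drop k).take (m' + 1)).length = m' + 1 := by
          simp [List.length_take, List.length_drop]; omega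
        obtain ⟨a, t, hw⟩ : ∃ a t, (s.drop k).take (m' + 1) = a :: t := by
          cases hww : (s.drop k).take (m' + 1) with
          | nil => rw [hww] at hwl; simp at hwl
          | cons a t => exact ⟨a, t, rfl⟩
        have htl : t.length = m' := by rw [hw] at hwl; simpa using hwl
        rw [hw] at hbody ⊢
        exact (body_iff _ a t (by omega)).mp hbody
    · rintro ⟨idx, hlt, hch⟩
      refine ⟨idx, by rw [List.mem_range]; omega, ?_⟩
      simp only [Function.comp]
      have hsl : PySem.List.slice s (some ((0:Int) + idx)) (some ((0:Int) + idx + m)) =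
          (s.drop idx).take m := by
        rw [show (0:Int) + idx = ((idx:Nat):Int) by ring]
        exact PySem.List.slice_natCast_add s idx m
      rw [hsl]
      rcases Nat.eq_zero_or_pos m with hm0 | hmpos
      · subst hm0
        simp
      · obtain ⟨m', rfl⟩ : ∃ m', m = m' + 1 := ⟨m - 1, by omega⟩
        have hwl : ((s.drop idx).take (m' + 1)).length = m' + 1 := by
          simp [List.length_take, List.length_drop]; omega
        obtain ⟨a, t, hw⟩ : ∃ a t, (s.drop idx).take (m' + 1) = a :: t := by
          cases hww : (s.drop idx).take (m' + 1) with
          | nil => rw [hww] at hwl; simp at hwl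
          | cons a t => exact ⟨a, t, rfl⟩
        have htl : t.length = m' := by rw [hw] at hwl; simpa using hwl
        rw [hw] at hch ⊢
        exact (body_iff _ a t (by omega)).mpr hch

lemma WA_imp_W (m : Nat) (l : List Char) : WA m l → W m l := by
  rintro ⟨idx, hlt, hch⟩; exact ⟨idx, by omega, hch⟩

-- ===== VERDICT (by name: the statement is the Claim_ definition above) =====
theorem has_valid_char_run_spec : Claim_unchanged_has_valid_char_run := by
  intro password rl hDom hPre hND
  have hA := A_char password rl hPre
  have hB := B_char password rl
  have h0 : 0 ≤ rl := by rcases hPre with h | ⟨h, -⟩ <;> omega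
  by_cases ha : has_valid_char_run password rl = true
  · rw [ha]
    exact (hB.mpr (WA_imp_W _ _ (hA.mp ha))).symm
  · have ha' : has_valid_char_run password rl = false := by
      simpa using ha
    rw [ha']
    by_cases hb : has_valid_char_run_alt password rl = true
    · exfalso
      apply hND
      have hnWA : ¬ WA rl.toNat password.toList := fun h => ha (hA.mpr h)
      obtain ⟨idx, hle, hch⟩ := hB.mp hb
      have hidx : idx + rl.toNat = password.toList.length := by
        rcases Nat.lt_or_ge (idx + rl.toNat) password.toList.length with h | h
        · exact absurd ⟨idx, h, hch⟩ hnWA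
        · omega
      unfold D_has_valid_char_run
      refine ⟨by omega, ?_⟩
      intro i hi
      constructor
      · intro hc
        by_contra hne
        exact hnWA ⟨i, by omega, (chainB_iff _).mpr hc⟩
      · intro hieq
        subst hieq
        have hidx' : idx = password.toList.length - rl.toNat := by omega
        rw [hidx'] at hch
        exact (chainB_iff _).mp hch
    · rw [Bool.not_eq_true] at hb
      rw [hb]

theorem has_valid_char_run_changed : Claim_changed_has_valid_char_run := by
  unfold Claim_changed_has_valid_char_run; decide

theorem has_valid_char_run_tight : Claim_exact_has_valid_char_run := by
  intro password rl hDom hPre hD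
  have hA := A_char password rl hPre
  have hB := B_char password rl
  have h0 : 0 ≤ rl := by rcases hPre with h | ⟨h, -⟩ <;> omega
  obtain ⟨hle, hall⟩ := hD
  have hmn : rl.toNat ≤ password.toList.length := by omega
  have haf : has_valid_char_run password rl = false := by
    cases hav : has_valid_char_run password rl
    · rfl
    · obtain ⟨idx, hlt, hch⟩ := hA.mp hav
      have := (hall idx (by omega)).mp ((chainB_iff _).mp hch)
      omega
  have hbt : has_valid_char_run_alt password rl = true := by
    exact hB.mpr ⟨password.toList.length - rl.toNat, by omega,
      (chainB_iff _).mpr ((hall _ le_rfl).mpr rfl)⟩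
  rw [haf, hbt]
  simp
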